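-- pv_equiv track=rewrite | github.com/kenil22/Handwritten_Equation_Solver | equation_calculator.py | put_double_asterisk
-- ===== SOURCE A (Python) =====
-- def put_double_asterisk(s):
--     lst = list(s)
--     i = 0
--     while i < len(lst)-1:
--         if lst[i]=='x' or lst[i]=='y' or lst[i]=='z' or lst[i]=='X' or lst[i]=='Y' or lst[i]=='Z':
--             if lst[i+1].isdigit():
--                 lst.insert(i+1, '**')
--                 i += 1
--         i += 1
--     s_new = ''.join(lst)
--     return s_new
-- ===== SOURCE B (Python) =====
-- def put_double_asterisk(s):
--     pieces = [c + '**' if c in 'xyzXYZ' and n.isdigit() else c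
--               for c, n in zip(s, s[1:])]
--     if s:
--         pieces.append(s[-1])
--     return ''.join(pieces)
-- ===== Notes on version B (the rewrite author's own statement) =====
-- stated objective: simpler
-- what changed: A walks a mutable list with a while loop, inserting the double-asterisk marker mid-list and re-adjusting the index past each insertion; B builds the result in one pairwise zip pass over (char, next-char) pairs plus the final character, with no mutation, no mid-list insertion shifts and no index arithmetic.
import Mathlib
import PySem

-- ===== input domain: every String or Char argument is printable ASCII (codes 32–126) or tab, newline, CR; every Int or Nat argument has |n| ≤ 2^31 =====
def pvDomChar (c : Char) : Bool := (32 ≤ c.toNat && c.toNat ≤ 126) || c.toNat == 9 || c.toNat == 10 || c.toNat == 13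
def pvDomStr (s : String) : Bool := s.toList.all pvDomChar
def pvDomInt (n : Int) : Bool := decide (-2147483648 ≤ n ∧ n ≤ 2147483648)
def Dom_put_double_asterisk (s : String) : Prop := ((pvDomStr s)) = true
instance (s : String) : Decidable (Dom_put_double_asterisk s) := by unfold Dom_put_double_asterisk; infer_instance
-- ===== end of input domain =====

-- B replaces A's index-juggling while loop with in-place list insertion by a single
-- pairwise zip pass that builds the output pieces (no mid-list insertion shifts); objective: simpler.

-- ===== PORT A =====
-- the while loop: i walks the mutable list; on a match '**' is inserted at i+1 and i skips it.
-- Structural recursion on fuel = number of remaining loop tests; lst.length - i shrinks every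
-- iteration, so initial fuel lst.length is always enough and the loop's exit test ends it.
def pvALoop : Nat → List String → Nat → List String
  | 0, lst, _ => lst
  | n+1, lst, i =>
    if i < lst.length - 1 then
      if lst.getD i "" = "x" ∨ lst.getD i "" = "y" ∨ lst.getD i "" = "z" ∨
         lst.getD i "" = "X" ∨ lst.getD i "" = "Y" ∨ lst.getD i "" = "Z" then
        if PySem.Str.strIsdigit (lst.getD (i+1) "") then
          pvALoop n (PySem.List.insert lst ((i+1 : Nat) : Int) "**") ((i+1)+1)
        else pvALoop n lst (i+1)
      else pvALoop n lst (i+1)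
    else lst

def put_double_asterisk (s : String) : String :=
  -- lst = list(s): list of one-character strings
  PySem.Str.join "" (pvALoop (s.toList.map (fun c => String.ofList [c])).length (s.toList.map (fun c => String.ofList [c])) 0)

-- ===== PORT B =====
def put_double_asterisk_alt (s : String) : String :=
  let cs := s.toList
  -- [c + '**' if c in 'xyzXYZ' and n.isdigit() else c for c, n in zip(s, s[1:])]
  let pieces := (cs.zip (cs.drop 1)).map (fun p =>
    if p.1 ∈ (['x', 'y', 'z', 'X', 'Y', 'Z'] : List Char) ∧ PySem.Chars.isdigit p.2 then
      String.ofList [p.1, '*', '*']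
    else
      String.ofList [p.1])
  -- if s: pieces.append(s[-1])
  let pieces2 := match cs.getLast? with
    | some c => pieces ++ [String.ofList [c]]
    | none => pieces
  PySem.Str.join "" pieces2

-- ===== PRECONDITION & SPEC =====
def Spec_put_double_asterisk (s : String) (out : String) : Prop := out = put_double_asterisk_alt s
instance (s : String) (out : String) : Decidable (Spec_put_double_asterisk s out) := by unfold Spec_put_double_asterisk; infer_instance

-- ===== CLAIM (what is proved, stated in full; the proofs are below) =====
def Claim_equal_put_double_asterisk : Prop := ∀ (s : String), Dom_put_double_asterisk s → Spec_put_double_asterisk s (put_double_asterisk s)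

-- ===== LEMMAS AND PROOFS =====

-- A's loop, recast structurally: the pairwise walk it actually performs
def pvGo : List String → List String
  | a :: b :: rest =>
    if (a = "x" ∨ a = "y" ∨ a = "z" ∨ a = "X" ∨ a = "Y" ∨ a = "Z") ∧ PySem.Str.strIsdigit b then
      a :: "**" :: pvGo (b :: rest)
    else
      a :: pvGo (b :: rest)
  | l => l

theorem pvALoop_eq_go : ∀ (n : Nat) (lst : List String) (i : Nat), lst.length ≤ i + n →
    pvALoop n lst i = lst.take i ++ pvGo (lst.drop i) := by
  intro n
  induction n with
  | zero =>
    intro lst i hn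
    have hd : lst.drop i = [] := List.drop_eq_nil_of_le (by omega)
    rw [pvALoop, hd]
    simp [pvGo, List.take_of_length_le (by omega : lst.length ≤ i)]
  | succ n ih =>
    intro lst i hn
    rw [pvALoop]
    by_cases h : i < lst.length - 1
    · rw [if_pos h]
      have hi : i < lst.length := by omega
      have hi1 : i + 1 < lst.length := by omega
      have hdi : lst.drop i = lst[i] :: lst.drop (i+1) := List.drop_eq_getElem_cons hi
      have hdi1 : lst.drop (i+1) = lst[i+1] :: lst.drop (i+2) := List.drop_eq_getElem_cons hi1
      have hg0 : lst.getD i "" = lst[i] := List.getD_eq_getElem lst "" hi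
      have hg1 : lst.getD (i+1) "" = lst[i+1] := List.getD_eq_getElem lst "" hi1
      have htake : lst.take (i+1) = lst.take i ++ [lst[i]] := by
        rw [List.take_add_one, List.getElem?_eq_getElem hi]; rfl
      by_cases hv : lst[i] = "x" ∨ lst[i] = "y" ∨ lst[i] = "z" ∨
          lst[i] = "X" ∨ lst[i] = "Y" ∨ lst[i] = "Z"
      · rw [if_pos (by rw [hg0]; exact hv)]
        by_cases hdig : PySem.Str.strIsdigit (lst.getD (i+1) "") = true
        · rw [if_pos hdig]
          have hins : PySem.List.insert lst ((i+1 : Nat) : Int) "**"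
              = lst.take (i+1) ++ "**" :: lst.drop (i+1) :=
            PySem.List.insert_natCast lst (i+1) "**" (by omega)
          rw [ih _ _ (by rw [hins]; simp; omega)]
          rw [hins]
          have hlt : (lst.take (i+1)).length = i + 1 := by simp; omega
          have ht2 : (lst.take (i+1) ++ "**" :: lst.drop (i+1)).take (i+1+1)
              = lst.take (i+1) ++ ["**"] := by
            have := List.take_length_add_append (l₁ := lst.take (i+1)) (l₂ := "**" :: lst.drop (i+1)) 1
            rw [hlt] at this
            rw [this]; rfl
          have hd2 : (lst.take (i+1) ++ "**" :: lst.drop (i+1)).drop (i+1+1)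
              = lst.drop (i+1) := by
            have := List.drop_length_add_append (l₁ := lst.take (i+1)) (l₂ := "**" :: lst.drop (i+1)) 1
            rw [hlt] at this
            rw [this]; rfl
          rw [ht2, hd2, hdi, hdi1, pvGo]
          rw [if_pos ⟨hv, by rw [hg1] at hdig; exact hdig⟩]
          rw [htake]
          simp only [List.append_assoc, List.cons_append, List.nil_append]
        · rw [if_neg hdig]
          rw [ih _ _ (by omega)]
          rw [hg1] at hdig
          rw [hdi, hdi1, pvGo, if_neg (fun hh => hdig hh.2), htake, ← hdi1, List.append_assoc]
          rfl
      · rw [if_neg (by rw [hg0]; exact hv)]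
        rw [ih _ _ (by omega)]
        rw [hdi, hdi1, pvGo, if_neg (fun hh => hv hh.1), htake, ← hdi1, List.append_assoc]
        rfl
    · rw [if_neg h]
      have : lst.drop i = [] ∨ ∃ a, lst.drop i = [a] := by
        have := List.length_drop (l := lst) (i := i)
        rcases hh : lst.drop i with _ | ⟨a, _ | _⟩ <;> (simp_all; try omega)
      rcases this with hd | ⟨a, hd⟩ <;>
        · rw [hd]; simp [pvGo, ← hd, List.take_append_drop]

theorem chars_join_nil_flatten (xss : List (List Char)) :
    PySem.Chars.join [] xss = xss.flatten := by
  induction xss with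
  | nil => rfl
  | cons a t ih =>
    cases t with
    | nil => simp [PySem.Chars.join_singleton]
    | cons b r => rw [PySem.Chars.join_cons_cons]; simp_all

theorem strIsdigit_single (d : Char) : PySem.Str.strIsdigit (String.ofList [d]) = PySem.Chars.isdigit d := by
  simp [PySem.Str.strIsdigit, PySem.Chars.strIsdigit]

theorem single_eq_lit (c x : Char) : (String.ofList [c] = String.ofList [x]) ↔ c = x := by
  constructor
  · intro h; have := congrArg String.toList h; simpa using this
  · rintro rfl; rfl

theorem cond_iff (c d : Char) :
    ((String.ofList [c] = "x" ∨ String.ofList [c] = "y" ∨ String.ofList [c] = "z" ∨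
      String.ofList [c] = "X" ∨ String.ofList [c] = "Y" ∨ String.ofList [c] = "Z") ∧
      PySem.Str.strIsdigit (String.ofList [d]) = true)
    ↔ (c ∈ (['x', 'y', 'z', 'X', 'Y', 'Z'] : List Char) ∧ PySem.Chars.isdigit d = true) := by
  rw [show ("x" : String) = String.ofList ['x'] from by decide,
      show ("y" : String) = String.ofList ['y'] from by decide,
      show ("z" : String) = String.ofList ['z'] from by decide,
      show ("X" : String) = String.ofList ['X'] from by decide,
      show ("Y" : String) = String.ofList ['Y'] from by decide,
      show ("Z" : String) = String.ofList ['Z'] from by decide,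
      strIsdigit_single]
  simp only [single_eq_lit, List.mem_cons, List.not_mem_nil, or_false]

theorem pvGo_flatten (cs : List Char) :
    ((pvGo (cs.map (fun c => String.ofList [c]))).map String.toList).flatten
    = ((cs.zip (cs.drop 1)).map (fun p =>
        if p.1 ∈ (['x', 'y', 'z', 'X', 'Y', 'Z'] : List Char) ∧ PySem.Chars.isdigit p.2 then
          [p.1, '*', '*'] else [p.1])).flatten
      ++ (match cs.getLast? with | some c => [c] | none => []) := by
  induction cs with
  | nil => rfl
  | cons c t ih =>
    cases t with
    | nil => simp [pvGo]
    | cons d r =>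
      simp only [List.map_cons, pvGo, List.drop_succ_cons, List.drop_zero, List.zip_cons_cons,
        List.getLast?_cons_cons]
      by_cases hc : c ∈ (['x', 'y', 'z', 'X', 'Y', 'Z'] : List Char) ∧ PySem.Chars.isdigit d = true
      · rw [if_pos ((cond_iff c d).mpr hc), if_pos hc]
        simp only [List.map_cons, List.drop_succ_cons, List.drop_zero] at ih
        simp only [List.map_cons, List.flatten_cons]
        rw [ih]
        simp
      · rw [if_neg (fun hh => hc ((cond_iff c d).mp hh)), if_neg hc]
        simp only [List.map_cons, List.drop_succ_cons, List.drop_zero] at ih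
        simp only [List.map_cons, List.flatten_cons]
        rw [ih]
        simp

theorem toList_injective {s t : String} (h : s.toList = t.toList) : s = t := by
  have := congrArg String.ofList h
  simpa using this

-- ===== VERDICT (by name: the statement is the Claim_ definition above) =====

-- ===== VERDICT (by name: the statement is the Claim_ definition above) =====
theorem put_double_asterisk_spec : Claim_equal_put_double_asterisk := by
  intro s _
  unfold Spec_put_double_asterisk put_double_asterisk put_double_asterisk_alt
  apply toList_injective
  rw [pvALoop_eq_go (s.toList.map (fun c => String.ofList [c])).length _ 0 (by omega)]
  simp only [List.take_zero, List.drop_zero, List.nil_append]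
  rw [PySem.Str.toList_join, PySem.Str.toList_join,
      show ("" : String).toList = [] from rfl,
      chars_join_nil_flatten, chars_join_nil_flatten]
  cases h : s.toList.getLast? with
  | none =>
    have : s.toList = [] := List.getLast?_eq_none_iff.mp h
    simp [this, pvGo]
  | some c =>
    have := pvGo_flatten s.toList
    rw [h] at this
    rw [this]
    simp [List.map_map, Function.comp_def, apply_ite String.toList]
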